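-- pv_equiv track=rewrite | github.com/serversetup/SetupServer | sss/cli/plugins/site_functions.py | detSitePar
-- ===== SOURCE A (Python) =====
-- def detSitePar(opts):
--     """
--         Takes dictionary of parsed arguments
--         1.returns sitetype and cachetype
--         2. raises RuntimeError when wrong combination is used like
--             "--wp --wpsubdir" or "--html --wp"
--     """
--     sitetype, cachetype = '', ''
--     typelist = list()
--     cachelist = list()
--     for key, val in opts.items():
--         if val and key in ['html', 'php', 'mysql', 'wp',
--                            'wpsubdir', 'wpsubdomain']:
--             typelist.append(key)
--         elif val and key in ['wpfc', 'wpsc', 'w3tc', 'wpredis']: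
--             cachelist.append(key)
--
--     if len(typelist) > 1 or len(cachelist) > 1:
--         if len(cachelist) > 1:
--             raise RuntimeError("Could not determine cache type.Multiple cache parameter entered")
--         elif False not in [x in ('php','mysql','html') for x in typelist]:
--             sitetype = 'mysql'
--             if not cachelist:
--                 cachetype = 'basic'
--             else:
--                 cachetype = cachelist[0]
--         elif False not in [x in ('php','mysql') for x in typelist]:
--             sitetype = 'mysql'
--             if not cachelist:
--                 cachetype = 'basic'
--             else:
--                 cachetype = cachelist[0]
--         elif False not in [x in ('html','mysql') for x in typelist]:
--             sitetype = 'mysql'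
--             if not cachelist:
--                 cachetype = 'basic'
--             else:
--                 cachetype = cachelist[0]
--         elif False not in [x in ('php','html') for x in typelist]:
--             sitetype = 'php'
--             if not cachelist:
--                 cachetype = 'basic'
--             else:
--                 cachetype = cachelist[0]
--         elif False not in [x in ('wp','wpsubdir') for x in typelist]:
--             sitetype = 'wpsubdir'
--             if not cachelist:
--                 cachetype = 'basic'
--             else:
--                 cachetype = cachelist[0]
--         elif False not in [x in ('wp','wpsubdomain') for x in typelist]:
--             sitetype = 'wpsubdomain'
--             if not cachelist:
--                 cachetype = 'basic'
--             else:
--                 cachetype = cachelist[0]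
--         else:
--             raise RuntimeError("could not determine site and cache type")
--
--     else:
--         if not typelist and not cachelist:
--             sitetype = None
--             cachetype = None
--         elif (not typelist) and cachelist:
--             sitetype = 'wp'
--             cachetype = cachelist[0]
--         elif typelist and (not cachelist):
--             sitetype = typelist[0]
--             cachetype = 'basic'
--         else:
--             sitetype = typelist[0]
--             cachetype = cachelist[0]
--     return (sitetype, cachetype)
-- ===== SOURCE B (Python) =====
-- TYPEBIT = {'html': 1, 'php': 2, 'mysql': 4, 'wp': 8, 'wpsubdir': 16, 'wpsubdomain': 32}
-- CACHEKEYS = ('wpfc', 'wpsc', 'w3tc', 'wpredis')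
--
--
-- def detSitePar(opts):
--     """Single pass with bitmask/counters/first-seen state; no intermediate lists."""
--     tcount = tmask = ccount = 0
--     tfirst = cfirst = None
--     for key, val in opts.items():
--         if not val:
--             continue
--         b = TYPEBIT.get(key)
--         if b is not None:
--             tcount += 1
--             tmask |= b
--             if tfirst is None:
--                 tfirst = key
--         elif key in CACHEKEYS:
--             ccount += 1
--             if cfirst is None:
--                 cfirst = key
--     if ccount > 1:
--         raise RuntimeError("Could not determine cache type.Multiple cache parameter entered")
--     cachetype = cfirst if ccount else 'basic'
--     if tcount > 1:
--         if tmask | 0b000111 == 0b000111:    # subset of {html, php, mysql}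
--             return ('mysql', cachetype)
--         if tmask | 0b011000 == 0b011000:    # subset of {wp, wpsubdir}
--             return ('wpsubdir', cachetype)
--         if tmask | 0b101000 == 0b101000:    # subset of {wp, wpsubdomain}
--             return ('wpsubdomain', cachetype)
--         raise RuntimeError("could not determine site and cache type")
--     if tcount == 0:
--         return (None, None) if ccount == 0 else ('wp', cachetype)
--     return (tfirst, cachetype)
-- ===== Notes on version B (the rewrite author's own statement) =====
-- stated objective: alternative
-- what changed: Replaces A's two accumulated key lists and six-branch subset cascade by a single pass maintaining a bitmask of seen type flags plus counters and first-seen keys, resolving the multi-type case with three bitwise superset tests instead of per-element membership scans.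
import Mathlib
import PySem

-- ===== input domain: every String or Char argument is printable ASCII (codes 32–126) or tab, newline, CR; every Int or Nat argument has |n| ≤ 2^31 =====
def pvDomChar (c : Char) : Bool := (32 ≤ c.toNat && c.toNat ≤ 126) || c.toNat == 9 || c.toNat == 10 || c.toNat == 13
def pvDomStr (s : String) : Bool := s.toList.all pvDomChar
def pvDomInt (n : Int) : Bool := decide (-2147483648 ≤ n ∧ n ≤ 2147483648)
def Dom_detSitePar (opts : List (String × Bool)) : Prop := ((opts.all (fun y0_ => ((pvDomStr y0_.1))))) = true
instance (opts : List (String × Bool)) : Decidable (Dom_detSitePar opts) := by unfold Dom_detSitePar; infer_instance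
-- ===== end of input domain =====

-- B replaces A's two accumulated key lists and six-branch subset cascade by one pass
-- maintaining a bitmask of seen type flags, counters and first-seen keys, and three
-- bitwise superset tests; objective: alternative (same O(n) cost).

-- ===== PORT A =====
-- literal transliteration of A: one fold building (typelist, cachelist), then the cascade.
-- Where the Python raises RuntimeError the port returns (none, none); those inputs are
-- excluded by Pre_detSitePar.
def detSitePar (opts : List (String × Bool)) : Option String × Option String :=
  let tc := opts.foldl (fun (acc : List String × List String) kv =>
      if kv.2 && ["html", "php", "mysql", "wp", "wpsubdir", "wpsubdomain"].contains kv.1 then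
        (acc.1 ++ [kv.1], acc.2)
      else if kv.2 && ["wpfc", "wpsc", "w3tc", "wpredis"].contains kv.1 then
        (acc.1, acc.2 ++ [kv.1])
      else acc) ([], [])
  let typelist := tc.1
  let cachelist := tc.2
  if typelist.length > 1 || cachelist.length > 1 then
    if cachelist.length > 1 then
      (none, none)  -- Python: raise RuntimeError (multiple cache); outside Pre_
    else if !((typelist.map (fun x => ["php", "mysql", "html"].contains x)).contains false) then
      (some "mysql", some (if cachelist.isEmpty then "basic" else cachelist.headD ""))
    else if !((typelist.map (fun x => ["php", "mysql"].contains x)).contains false) then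
      (some "mysql", some (if cachelist.isEmpty then "basic" else cachelist.headD ""))
    else if !((typelist.map (fun x => ["html", "mysql"].contains x)).contains false) then
      (some "mysql", some (if cachelist.isEmpty then "basic" else cachelist.headD ""))
    else if !((typelist.map (fun x => ["php", "html"].contains x)).contains false) then
      (some "php", some (if cachelist.isEmpty then "basic" else cachelist.headD ""))
    else if !((typelist.map (fun x => ["wp", "wpsubdir"].contains x)).contains false) then
      (some "wpsubdir", some (if cachelist.isEmpty then "basic" else cachelist.headD ""))
    else if !((typelist.map (fun x => ["wp", "wpsubdomain"].contains x)).contains false) then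
      (some "wpsubdomain", some (if cachelist.isEmpty then "basic" else cachelist.headD ""))
    else
      (none, none)  -- Python: raise RuntimeError (could not determine); outside Pre_
  else
    if typelist.isEmpty && cachelist.isEmpty then (none, none)
    else if typelist.isEmpty && !cachelist.isEmpty then (some "wp", some (cachelist.headD ""))
    else if !typelist.isEmpty && cachelist.isEmpty then (some (typelist.headD ""), some "basic")
    else (some (typelist.headD ""), some (cachelist.headD ""))

-- ===== PORT B =====
-- TYPEBIT.get(key) of Source B: first-match lookup in the literal dict
def pvTypeBit? (k : String) : Option Nat :=
  if k = "html" then some 1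
  else if k = "php" then some 2
  else if k = "mysql" then some 4
  else if k = "wp" then some 8
  else if k = "wpsubdir" then some 16
  else if k = "wpsubdomain" then some 32
  else none

-- literal transliteration of Source B: single fold over the state
-- (tcount, tmask, tfirst, ccount, cfirst), then bitwise superset tests.
def detSitePar_alt (opts : List (String × Bool)) : Option String × Option String :=
  let st := opts.foldl
    (fun (st : Nat × Nat × Option String × Nat × Option String) kv =>
      let (tcount, tmask, tfirst, ccount, cfirst) := st
      if !kv.2 then st
      else
        match pvTypeBit? kv.1 with
        | some b =>
            (tcount + 1, tmask ||| b,
             (if tfirst.isNone then some kv.1 else tfirst), ccount, cfirst)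
        | none =>
            if ["wpfc", "wpsc", "w3tc", "wpredis"].contains kv.1 then
              (tcount, tmask, tfirst, ccount + 1,
               (if cfirst.isNone then some kv.1 else cfirst))
            else st)
    (0, 0, none, 0, none)
  let tcount := st.1
  let tmask := st.2.1
  let tfirst := st.2.2.1
  let ccount := st.2.2.2.1
  let cfirst := st.2.2.2.2
  if ccount > 1 then
    (none, none)  -- Python: raise RuntimeError (multiple cache); outside Pre_
  else
    let cachetype := if ccount = 0 then "basic" else cfirst.getD ""
    if tcount > 1 then
      if tmask ||| 7 == 7 then (some "mysql", some cachetype)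
      else if tmask ||| 24 == 24 then (some "wpsubdir", some cachetype)
      else if tmask ||| 40 == 40 then (some "wpsubdomain", some cachetype)
      else (none, none)  -- Python: raise RuntimeError (could not determine); outside Pre_
    else if tcount = 0 then
      if ccount = 0 then (none, none) else (some "wp", some cachetype)
    else (some (tfirst.getD ""), some cachetype)

-- ===== PRECONDITION & SPEC =====
-- Pre_ excludes exactly the inputs on which A raises RuntimeError: more than one enabled
-- cache flag, or more than one enabled type flag outside every allowed combination.
def Pre_detSitePar (opts : List (String × Bool)) : Prop :=
  let T := (opts.filter (fun kv =>
      kv.2 && ["html", "php", "mysql", "wp", "wpsubdir", "wpsubdomain"].contains kv.1)).map Prod.fst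
  let C := (opts.filter (fun kv =>
      kv.2 && ["wpfc", "wpsc", "w3tc", "wpredis"].contains kv.1)).map Prod.fst
  C.length ≤ 1 ∧
    (T.length ≤ 1 ∨ T.all (fun x => ["php", "mysql", "html"].contains x) = true ∨
      T.all (fun x => ["wp", "wpsubdir"].contains x) = true ∨
      T.all (fun x => ["wp", "wpsubdomain"].contains x) = true)
instance (opts : List (String × Bool)) : Decidable (Pre_detSitePar opts) := by
  unfold Pre_detSitePar; infer_instance
def pvWitness_detSitePar : (List (String × Bool)) := [("wp", true), ("wpsubdir", true), ("wpfc", true)]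
def Spec_detSitePar (opts : List (String × Bool)) (out : Option String × Option String) : Prop := out = detSitePar_alt opts
instance (opts : List (String × Bool)) (out : Option String × Option String) : Decidable (Spec_detSitePar opts out) := by unfold Spec_detSitePar; infer_instance

-- ===== CLAIM (what is proved, stated in full; the proofs are below) =====
def Claim_equal_detSitePar : Prop := ∀ (opts : List (String × Bool)), Dom_detSitePar opts → Pre_detSitePar opts → Spec_detSitePar opts (detSitePar opts)

-- ===== LEMMAS AND PROOFS =====

-- the two flag families are disjoint
theorem pv_disj (k : String)
    (h : (["html", "php", "mysql", "wp", "wpsubdir", "wpsubdomain"] : List String).contains k = true) :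
    (["wpfc", "wpsc", "w3tc", "wpredis"] : List String).contains k = false := by
  simp only [List.contains_eq_mem, List.mem_cons, List.not_mem_nil, or_false,
    decide_eq_true_eq, decide_eq_false_iff_not] at h ⊢
  rcases h with rfl | rfl | rfl | rfl | rfl | rfl <;> simp

-- pvTypeBit? is some exactly on the six type keys
theorem pv_typeBit_some (k : String)
    (h : (["html", "php", "mysql", "wp", "wpsubdir", "wpsubdomain"] : List String).contains k = true) :
    ∃ b : Nat, pvTypeBit? k = some b := by
  simp only [List.contains_eq_mem, List.mem_cons, List.not_mem_nil, or_false,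
    decide_eq_true_eq] at h
  rcases h with rfl | rfl | rfl | rfl | rfl | rfl <;> exact ⟨_, rfl⟩

theorem pv_typeBit_none (k : String)
    (h : (["html", "php", "mysql", "wp", "wpsubdir", "wpsubdomain"] : List String).contains k = false) :
    pvTypeBit? k = none := by
  simp only [List.contains_eq_mem, List.mem_cons, List.not_mem_nil, or_false,
    decide_eq_false_iff_not, not_or] at h
  unfold pvTypeBit?
  simp [h.1, h.2.1, h.2.2.1, h.2.2.2.1, h.2.2.2.2.1, h.2.2.2.2.2]

-- A's fold computes the two filters
theorem pv_fold_eq (opts : List (String × Bool)) (acc : List String × List String) :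
    opts.foldl (fun (acc : List String × List String) kv =>
      if kv.2 && ["html", "php", "mysql", "wp", "wpsubdir", "wpsubdomain"].contains kv.1 then
        (acc.1 ++ [kv.1], acc.2)
      else if kv.2 && ["wpfc", "wpsc", "w3tc", "wpredis"].contains kv.1 then
        (acc.1, acc.2 ++ [kv.1])
      else acc) acc =
    (acc.1 ++ (opts.filter (fun kv =>
        kv.2 && ["html", "php", "mysql", "wp", "wpsubdir", "wpsubdomain"].contains kv.1)).map Prod.fst,
     acc.2 ++ (opts.filter (fun kv =>
        kv.2 && ["wpfc", "wpsc", "w3tc", "wpredis"].contains kv.1)).map Prod.fst) := by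
  induction opts generalizing acc with
  | nil => simp
  | cons kv rest ih =>
    rw [List.foldl_cons, ih, List.filter_cons, List.filter_cons]
    by_cases h1 : (kv.2 && ["html", "php", "mysql", "wp", "wpsubdir", "wpsubdomain"].contains kv.1) = true
    · have h2 : (kv.2 && ["wpfc", "wpsc", "w3tc", "wpredis"].contains kv.1) = false := by
        rcases Bool.and_eq_true_iff.mp h1 with ⟨hv, hc⟩
        rw [pv_disj kv.1 hc, Bool.and_false]
      rw [if_pos h1, h2, if_pos h1]
      simp
    · rw [if_neg h1]
      by_cases h2 : (kv.2 && ["wpfc", "wpsc", "w3tc", "wpredis"].contains kv.1) = true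
      · rw [if_pos h2, if_neg h1, if_pos h2]; simp
      · rw [if_neg h2, if_neg h1, if_neg h2]

-- B's fold state in terms of the two filters
theorem pv_foldB_eq (opts : List (String × Bool))
    (tc tm : Nat) (tf : Option String) (cc : Nat) (cf : Option String) :
    opts.foldl
      (fun (st : Nat × Nat × Option String × Nat × Option String) kv =>
        let (tcount, tmask, tfirst, ccount, cfirst) := st
        if !kv.2 then st
        else
          match pvTypeBit? kv.1 with
          | some b =>
              (tcount + 1, tmask ||| b,
               (if tfirst.isNone then some kv.1 else tfirst), ccount, cfirst)
          | none =>
              if ["wpfc", "wpsc", "w3tc", "wpredis"].contains kv.1 then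
                (tcount, tmask, tfirst, ccount + 1,
                 (if cfirst.isNone then some kv.1 else cfirst))
              else st)
      (tc, tm, tf, cc, cf) =
    (let T := (opts.filter (fun kv =>
        kv.2 && ["html", "php", "mysql", "wp", "wpsubdir", "wpsubdomain"].contains kv.1)).map Prod.fst
     let C := (opts.filter (fun kv =>
        kv.2 && ["wpfc", "wpsc", "w3tc", "wpredis"].contains kv.1)).map Prod.fst
     (tc + T.length, T.foldl (fun m k => m ||| (pvTypeBit? k).getD 0) tm,
      (if tf.isNone then T.head? else tf), cc + C.length,
      (if cf.isNone then C.head? else cf))) := by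
  induction opts generalizing tc tm tf cc cf with
  | nil => cases tf <;> cases cf <;> simp
  | cons kv rest ih =>
    rw [List.foldl_cons]
    by_cases hv : kv.2 = true
    · by_cases ht : (["html", "php", "mysql", "wp", "wpsubdir", "wpsubdomain"] : List String).contains kv.1 = true
      · obtain ⟨b, hb⟩ := pv_typeBit_some kv.1 ht
        have hc : (["wpfc", "wpsc", "w3tc", "wpredis"] : List String).contains kv.1 = false := pv_disj kv.1 ht
        simp only [hv, Bool.not_true, if_neg (by simp : ¬ (false = true)), hb]
        rw [ih]
        simp only [List.filter_cons, hv, ht, hc, Bool.true_and,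
          if_neg (by simp : ¬ (false = true))]
        cases tf <;> simp [hb, Nat.add_comm, Nat.add_assoc, Nat.add_left_comm]
      · have hb := pv_typeBit_none kv.1 (Bool.eq_false_iff.mpr ht)
        by_cases hc : (["wpfc", "wpsc", "w3tc", "wpredis"] : List String).contains kv.1 = true
        · simp only [hv, Bool.not_true, if_neg (by simp : ¬ (false = true)), hb, hc, if_pos rfl]
          rw [ih]
          simp only [List.filter_cons, hv, Bool.true_and, Bool.eq_false_iff.mpr ht, hc,
            if_neg (by simp : ¬ (false = true)), if_pos rfl, List.map_cons, List.length_cons]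
          cases cf <;> simp [Nat.add_comm, Nat.add_assoc, Nat.add_left_comm]
        · simp only [hv, Bool.not_true, if_neg (by simp : ¬ (false = true)), hb,
            Bool.eq_false_iff.mpr hc, if_neg (by simp : ¬ (false = true))]
          rw [ih]
          simp only [List.filter_cons, hv, Bool.true_and, Bool.eq_false_iff.mpr ht,
            Bool.eq_false_iff.mpr hc, if_neg (by simp : ¬ (false = true))]
      all_goals skip
    · have hv' : kv.2 = false := Bool.eq_false_iff.mpr hv
      simp only [hv', Bool.not_false, if_pos rfl, if_true]
      rw [ih]
      simp only [List.filter_cons, hv', Bool.false_and, if_neg (by simp : ¬ (false = true)), if_true]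

-- bitwise: (a ||| b) ||| M = M iff both parts are submasks of M
theorem pv_or_split (a b M : Nat) : ((a ||| b) ||| M = M) ↔ (a ||| M = M ∧ b ||| M = M) := by
  constructor
  · intro h
    constructor <;>
      (apply Nat.eq_of_testBit_eq; intro i;
       have hh := congrArg (fun n => n.testBit i) h;
       simp only [Nat.testBit_or] at hh ⊢;
       cases ha : a.testBit i <;> cases hb : b.testBit i <;>
         cases hM : M.testBit i <;> simp_all)
  · intro ⟨h1, h2⟩
    apply Nat.eq_of_testBit_eq; intro i
    have g1 := congrArg (fun n => n.testBit i) h1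
    have g2 := congrArg (fun n => n.testBit i) h2
    simp only [Nat.testBit_or] at g1 g2 ⊢
    cases ha : a.testBit i <;> cases hb : b.testBit i <;> cases hM : M.testBit i <;> simp_all

-- the or-fold is a submask of M iff the seed and every element's bit are
theorem pv_fold_or_iff (T : List String) (tm M : Nat) :
    (T.foldl (fun m k => m ||| (pvTypeBit? k).getD 0) tm ||| M = M) ↔
      (tm ||| M = M ∧ ∀ x ∈ T, (pvTypeBit? x).getD 0 ||| M = M) := by
  induction T generalizing tm with
  | nil => simp
  | cons a T ih =>
    rw [List.foldl_cons, ih]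
    constructor
    · intro ⟨h1, h2⟩
      rw [pv_or_split] at h1
      exact ⟨h1.1, by intro x hx; rcases List.mem_cons.mp hx with rfl | hx
                      exacts [h1.2, h2 x hx]⟩
    · intro ⟨h1, h2⟩
      exact ⟨(pv_or_split _ _ _).mpr ⟨h1, h2 a (List.mem_cons_self)⟩,
             fun x hx => h2 x (List.mem_cons_of_mem a hx)⟩

-- per-element: for a type key, its bit is a submask of M iff the key is in l
theorem pv_mask_all (T : List String) (M : Nat) (l : List String)
    (hT : ∀ x ∈ T, (["html", "php", "mysql", "wp", "wpsubdir", "wpsubdomain"] : List String).contains x = true)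
    (hx : ∀ k, k ∈ (["html", "php", "mysql", "wp", "wpsubdir", "wpsubdomain"] : List String) →
        (((pvTypeBit? k).getD 0 ||| M = M) ↔ l.contains k = true)) :
    ((T.foldl (fun m k => m ||| (pvTypeBit? k).getD 0) 0 ||| M == M) : Bool) =
      T.all (fun x => l.contains x) := by
  rw [Bool.eq_iff_iff, beq_iff_eq, pv_fold_or_iff, List.all_eq_true]
  constructor
  · intro ⟨_, h⟩ x hmem
    exact (hx x (by have := hT x hmem; simpa [List.contains_eq_mem] using this)).mp (h x hmem)
  · intro h
    refine ⟨by simp, fun x hmem => ?_⟩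
    exact (hx x (by have := hT x hmem; simpa [List.contains_eq_mem] using this)).mpr (h x hmem)

theorem pv_hx7 : ∀ k, k ∈ (["html", "php", "mysql", "wp", "wpsubdir", "wpsubdomain"] : List String) →
    (((pvTypeBit? k).getD 0 ||| (7:Nat) = 7) ↔ (["php", "mysql", "html"] : List String).contains k = true) := by
  intro k hk
  simp only [List.mem_cons, List.not_mem_nil, or_false] at hk
  rcases hk with rfl | rfl | rfl | rfl | rfl | rfl <;> decide

theorem pv_hx24 : ∀ k, k ∈ (["html", "php", "mysql", "wp", "wpsubdir", "wpsubdomain"] : List String) →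
    (((pvTypeBit? k).getD 0 ||| (24:Nat) = 24) ↔ (["wp", "wpsubdir"] : List String).contains k = true) := by
  intro k hk
  simp only [List.mem_cons, List.not_mem_nil, or_false] at hk
  rcases hk with rfl | rfl | rfl | rfl | rfl | rfl <;> decide

theorem pv_hx40 : ∀ k, k ∈ (["html", "php", "mysql", "wp", "wpsubdir", "wpsubdomain"] : List String) →
    (((pvTypeBit? k).getD 0 ||| (40:Nat) = 40) ↔ (["wp", "wpsubdomain"] : List String).contains k = true) := by
  intro k hk
  simp only [List.mem_cons, List.not_mem_nil, or_false] at hk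
  rcases hk with rfl | rfl | rfl | rfl | rfl | rfl <;> decide

-- "False not in [f x for x in T]" equals "all f T"
theorem pv_not_contains_false (T : List String) (f : String → Bool) :
    (!((T.map f).contains false)) = T.all f := by
  induction T with
  | nil => rfl
  | cons a T ih => cases h : f a <;> simp [List.all_cons, h, ← ih]

-- all over a smaller allowed set implies all over a superset
theorem pv_all_sub (T : List String) (l1 l2 : List String)
    (hsub : ∀ x : String, l1.contains x = true → l2.contains x = true)
    (h : T.all (fun x => l1.contains x) = true) : T.all (fun x => l2.contains x) = true := by
  rw [List.all_eq_true] at h ⊢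
  exact fun x hx => hsub x (h x hx)

-- the two tails agree as functions of (typelist, cachelist) under the precondition
theorem pv_tail_eq (T C : List String) (hc1 : C.length ≤ 1)
    (hT : ∀ x ∈ T, (["html", "php", "mysql", "wp", "wpsubdir", "wpsubdomain"] : List String).contains x = true)
    (htyp : T.length ≤ 1 ∨ T.all (fun x => ["php", "mysql", "html"].contains x) = true ∨
      T.all (fun x => ["wp", "wpsubdir"].contains x) = true ∨
      T.all (fun x => ["wp", "wpsubdomain"].contains x) = true) :
    (if T.length > 1 || C.length > 1 then
      if C.length > 1 then (none, none)
      else if !((T.map (fun x => ["php", "mysql", "html"].contains x)).contains false) then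
        (some "mysql", some (if C.isEmpty then "basic" else C.headD ""))
      else if !((T.map (fun x => ["php", "mysql"].contains x)).contains false) then
        (some "mysql", some (if C.isEmpty then "basic" else C.headD ""))
      else if !((T.map (fun x => ["html", "mysql"].contains x)).contains false) then
        (some "mysql", some (if C.isEmpty then "basic" else C.headD ""))
      else if !((T.map (fun x => ["php", "html"].contains x)).contains false) then
        (some "php", some (if C.isEmpty then "basic" else C.headD ""))
      else if !((T.map (fun x => ["wp", "wpsubdir"].contains x)).contains false) then
        (some "wpsubdir", some (if C.isEmpty then "basic" else C.headD ""))
      else if !((T.map (fun x => ["wp", "wpsubdomain"].contains x)).contains false) then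
        (some "wpsubdomain", some (if C.isEmpty then "basic" else C.headD ""))
      else (none, none)
    else
      if T.isEmpty && C.isEmpty then (none, none)
      else if T.isEmpty && !C.isEmpty then (some "wp", some (C.headD ""))
      else if !T.isEmpty && C.isEmpty then (some (T.headD ""), some "basic")
      else (some (T.headD ""), some (C.headD ""))
    : Option String × Option String) =
    (if C.length > 1 then (none, none)
    else
      let cachetype := if C.length = 0 then "basic" else C.head?.getD ""
      if T.length > 1 then
        if T.foldl (fun m k => m ||| (pvTypeBit? k).getD 0) 0 ||| 7 == 7 then
          (some "mysql", some cachetype)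
        else if T.foldl (fun m k => m ||| (pvTypeBit? k).getD 0) 0 ||| 24 == 24 then
          (some "wpsubdir", some cachetype)
        else if T.foldl (fun m k => m ||| (pvTypeBit? k).getD 0) 0 ||| 40 == 40 then
          (some "wpsubdomain", some cachetype)
        else (none, none)
      else if T.length = 0 then
        if C.length = 0 then (none, none) else (some "wp", some cachetype)
      else (some (T.head?.getD ""), some cachetype)) := by
  have hcb : decide (C.length > 1) = false := by simp; omega
  simp only [pv_not_contains_false,
    pv_mask_all T 7 _ hT pv_hx7, pv_mask_all T 24 _ hT pv_hx24, pv_mask_all T 40 _ hT pv_hx40]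
  by_cases ht : T.length > 1
  · have htb : decide (T.length > 1) = true := by simp [ht]
    simp only [hcb, htb, Bool.true_or, if_true, if_neg (by omega : ¬ C.length > 1), ht]
    by_cases b1 : (T.all fun x => (["php", "mysql", "html"] : List String).contains x) = true
    · simp only [b1, if_true]
      rcases C with _ | ⟨c, C'⟩ <;> simp
    · have b1' : (T.all fun x => (["php", "mysql", "html"] : List String).contains x) = false := by
        rwa [← Bool.not_eq_true]
      have b2' : (T.all fun x => (["php", "mysql"] : List String).contains x) = false := by
        rw [← Bool.not_eq_true]; intro h
        exact b1 (pv_all_sub T _ _ (by intro x hx; simp [List.contains_eq_mem] at hx ⊢; tauto) h)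
      have b3' : (T.all fun x => (["html", "mysql"] : List String).contains x) = false := by
        rw [← Bool.not_eq_true]; intro h
        exact b1 (pv_all_sub T _ _ (by intro x hx; simp [List.contains_eq_mem] at hx ⊢; tauto) h)
      have b4' : (T.all fun x => (["php", "html"] : List String).contains x) = false := by
        rw [← Bool.not_eq_true]; intro h
        exact b1 (pv_all_sub T _ _ (by intro x hx; simp [List.contains_eq_mem] at hx ⊢; tauto) h)
      by_cases b5 : (T.all fun x => (["wp", "wpsubdir"] : List String).contains x) = true
      · simp only [b1', b2', b3', b4', b5]
        rcases C with _ | ⟨c, C'⟩ <;> simp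
      · have b5' : (T.all fun x => (["wp", "wpsubdir"] : List String).contains x) = false := by
          rwa [← Bool.not_eq_true]
        by_cases b6 : (T.all fun x => (["wp", "wpsubdomain"] : List String).contains x) = true
        · simp only [b1', b2', b3', b4', b5', b6]
          rcases C with _ | ⟨c, C'⟩ <;> simp
        · rcases htyp with h | h | h | h
          · omega
          · exact absurd h b1
          · exact absurd h b5
          · exact absurd h b6
  · have htb : decide (T.length > 1) = false := by simp; omega
    simp only [htb, hcb, Bool.or_self, if_neg (by simp : ¬ (false = true)),
      if_neg (by omega : ¬ C.length > 1), if_neg ht]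
    have hC0 : C = [] ∨ ∃ c : String, C = [c] := by
      rcases C with _ | ⟨c, C'⟩
      · exact Or.inl rfl
      · rcases C' with _ | ⟨c', C''⟩
        · exact Or.inr ⟨c, rfl⟩
        · simp at hc1
    have hT0 : T = [] ∨ ∃ t : String, T = [t] := by
      rcases T with _ | ⟨t, T'⟩
      · exact Or.inl rfl
      · rcases T' with _ | ⟨t', T''⟩
        · exact Or.inr ⟨t, rfl⟩
        · simp at ht
    rcases hT0 with rfl | ⟨t, rfl⟩ <;> rcases hC0 with rfl | ⟨c, rfl⟩ <;> simp

-- membership in the type filter implies the six-key invariant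
theorem pv_filter_mem (opts : List (String × Bool)) (x : String)
    (hx : x ∈ (opts.filter (fun kv =>
        kv.2 && ["html", "php", "mysql", "wp", "wpsubdir", "wpsubdomain"].contains kv.1)).map Prod.fst) :
    (["html", "php", "mysql", "wp", "wpsubdir", "wpsubdomain"] : List String).contains x = true := by
  rcases List.mem_map.mp hx with ⟨kv, hmem, rfl⟩
  have := (List.mem_filter.mp hmem).2
  exact (Bool.and_eq_true_iff.mp this).2

-- ===== VERDICT (by name: the statement is the Claim_ definition above) =====
theorem detSitePar_spec : Claim_equal_detSitePar := by
  intro opts _ hpre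
  unfold Pre_detSitePar at hpre
  unfold Spec_detSitePar detSitePar detSitePar_alt
  rw [pv_fold_eq, pv_foldB_eq]
  simp only [List.nil_append, Nat.zero_add, Option.isNone_none]
  exact pv_tail_eq _ _ hpre.1 (pv_filter_mem opts) hpre.2
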